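-- pv_equiv track=rewrite | github.com/daniel-reich/ubiquitous-fiesta | Yfm3h3nT3apARd4gC_14.py | rolls
-- ===== SOURCE A (Python) =====
-- def rolls(lst):
--   sum = 0
--   good_luck_multiplier = 1
--   for num in lst:
--     roll = num
--     roll*= good_luck_multiplier
--     sum += roll
--     good_luck_multiplier = 1
--     if num == 1:
--       good_luck_multiplier = 0
--     elif num == 6:
--       good_luck_multiplier = 2
--   return sum
-- ===== SOURCE B (Python) =====
-- def rolls(lst):
--   # Base sum of all rolls, then corrections per adjacent pair:
--   # a roll after a 6 counts twice (add it once more), a roll after a 1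
--   # counts zero times (subtract it once).
--   pairs = list(zip(lst, lst[1:]))
--   bonus = sum(c for p, c in pairs if p == 6)
--   penalty = sum(c for p, c in pairs if p == 1)
--   return sum(lst) + bonus - penalty
-- ===== Notes on version B (the rewrite author's own statement) =====
-- stated objective: alternative
-- what changed: Replaces A's stateful multiplier loop with an arithmetic reformulation: plain sum of all rolls plus a correction over adjacent pairs (add the roll following a 6, subtract the roll following a 1), so no multiplier state is ever carried.
import Mathlib
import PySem

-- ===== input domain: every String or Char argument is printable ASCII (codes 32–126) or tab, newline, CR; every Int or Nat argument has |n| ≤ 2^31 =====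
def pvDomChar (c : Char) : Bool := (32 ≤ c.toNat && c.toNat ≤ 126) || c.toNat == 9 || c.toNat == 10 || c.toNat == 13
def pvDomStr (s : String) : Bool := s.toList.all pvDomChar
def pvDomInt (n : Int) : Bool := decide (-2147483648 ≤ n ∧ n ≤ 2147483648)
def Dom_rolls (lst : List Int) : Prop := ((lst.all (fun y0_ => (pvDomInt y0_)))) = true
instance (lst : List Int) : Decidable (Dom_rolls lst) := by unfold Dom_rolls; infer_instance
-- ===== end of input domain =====

-- B replaces A's stateful multiplier loop by a sum-plus-corrections formulation over adjacent pairs (alternative decomposition, same cost).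


-- ===== PORT A =====
-- loop body: state = (sum, good_luck_multiplier)
def rollsStep (s : Int × Int) (num : Int) : Int × Int :=
  (s.1 + num * s.2, if num = 1 then 0 else if num = 6 then 2 else 1)

def rolls (lst : List Int) : Int :=
  (lst.foldl rollsStep (0, 1)).1

-- ===== PORT B =====
-- pairs = zip(lst, lst[1:]); bonus = rolls after a 6; penalty = rolls after a 1
def rolls_alt (lst : List Int) : Int :=
  let pairs := lst.zip lst.tail
  let bonus := ((pairs.filter (fun pc => pc.1 == 6)).map Prod.snd).sum
  let penalty := ((pairs.filter (fun pc => pc.1 == 1)).map Prod.snd).sum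
  lst.sum + bonus - penalty

-- ===== PRECONDITION & SPEC =====
def Spec_rolls (lst : List Int) (out : Int) : Prop := out = rolls_alt lst
instance (lst : List Int) (out : Int) : Decidable (Spec_rolls lst out) := by unfold Spec_rolls; infer_instance

-- ===== CLAIM (what is proved, stated in full; the proofs are below) =====
def Claim_equal_rolls : Prop := ∀ (lst : List Int), Dom_rolls lst → Spec_rolls lst (rolls lst)

-- ===== LEMMAS AND PROOFS =====
-- abbreviations for the two correction sums of B
def rollsBonus (lst : List Int) : Int :=
  (((lst.zip lst.tail).filter (fun pc => pc.1 == 6)).map Prod.snd).sum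
def rollsPenalty (lst : List Int) : Int :=
  (((lst.zip lst.tail).filter (fun pc => pc.1 == 1)).map Prod.snd).sum

theorem rollsBonus_cons (x c : Int) (rest : List Int) :
    rollsBonus (x :: c :: rest) = (if x = 6 then c else 0) + rollsBonus (c :: rest) := by
  by_cases h : x = 6 <;> simp [rollsBonus, h]

theorem rollsPenalty_cons (x c : Int) (rest : List Int) :
    rollsPenalty (x :: c :: rest) = (if x = 1 then c else 0) + rollsPenalty (c :: rest) := by
  by_cases h : x = 1 <;> simp [rollsPenalty, h]

-- loop invariant: a fold started with the multiplier determined by x equals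
-- sum + bonus − penalty of (x :: xs), offset by the accumulator s
theorem rolls_loop (xs : List Int) (x s : Int) :
    (xs.foldl rollsStep (s, if x = 1 then 0 else if x = 6 then 2 else 1)).1
      = s + xs.sum + rollsBonus (x :: xs) - rollsPenalty (x :: xs) := by
  induction xs generalizing x s with
  | nil => simp [rollsBonus, rollsPenalty]
  | cons c rest ih =>
    simp only [List.foldl_cons, List.sum_cons]
    rw [rollsBonus_cons, rollsPenalty_cons]
    have hstep : rollsStep (s, if x = 1 then 0 else if x = 6 then 2 else 1) c
        = (s + c * (if x = 1 then 0 else if x = 6 then 2 else 1),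
           if c = 1 then 0 else if c = 6 then 2 else 1) := by
      simp [rollsStep]
    rw [hstep, ih]
    split_ifs <;> first | (exfalso; omega) | ring

-- ===== VERDICT (by name: the statement is the Claim_ definition above) =====
theorem rolls_spec : Claim_equal_rolls := by
  intro lst _
  show rolls lst = rolls_alt lst
  cases lst with
  | nil => rfl
  | cons x xs =>
    show ((x :: xs).foldl rollsStep (0, 1)).1 = _
    simp only [List.foldl_cons]
    have hstep : rollsStep (0, 1) x
        = (0 + x * 1, if x = 1 then 0 else if x = 6 then 2 else 1) := by
      simp [rollsStep]
    rw [hstep, rolls_loop]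
    simp [rolls_alt, rollsBonus, rollsPenalty]
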